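-- pv_equiv track=rewrite | github.com/ryokbys/nap | nappy/scheduler/pbs.py | parse_jobdata
-- ===== SOURCE A (Python) =====
-- _fields = (
--     'Job Id', 'Job_Name', 'Job_Owner', 'job_state',
--     'queue', 'server', 'Checkpoint', 'ctime',
--     'Error_Path', 'exec_host', 'Hold_Types'
--     'Join_Path', 'Keep_Files', 'Mail_Points'
--     'mtime', 'Output_Path', 'Priority', 'qtime', 'Rerunable',
--     'Resource_List.cput', 'Resource_List.nodect',
--     'Resource_List.nodes', 'session_id',
--     'Variable_List', 'etime'
--     'submit_args', 'start_time', 'start_count',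
-- )
--
-- def parse_jobdata(command_out):
--     """
--     Parse job data from output of `qstat -f` command.
--     `command_out` should be passed to this function as argument.
--     """
--
--     output = [ o for o in command_out.splitlines() ]
--
--     jobdata = []
--     reading_job = False
--     job = {}
--     for line in output:
--         if 'Job Id' in line:
--             if len(job) != 0:
--                 jobdata.append(job)
--                 job = {}  ## refresh job
--             jobid_str = line.split()[2]
--             job['Job Id'] = jobid_str.split('.')[0]
--         else:
--             for fld in _fields:
--                 if fld in line:
--                     entry = line.split()
--                     value = entry[1]
--                     if value == '=':
--                         value = entry[2]
--                     job[fld] = value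
--     if len(job) > 0:
--         jobdata.append(job)
--     return jobdata
-- ===== SOURCE B (Python) =====
-- _fields = (
--     'Job Id', 'Job_Name', 'Job_Owner', 'job_state',
--     'queue', 'server', 'Checkpoint', 'ctime',
--     'Error_Path', 'exec_host', 'Hold_Types'
--     'Join_Path', 'Keep_Files', 'Mail_Points'
--     'mtime', 'Output_Path', 'Priority', 'qtime', 'Rerunable',
--     'Resource_List.cput', 'Resource_List.nodect',
--     'Resource_List.nodes', 'session_id',
--     'Variable_List', 'etime'
--     'submit_args', 'start_time', 'start_count',
-- )
--
-- def parse_jobdata(command_out):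
--     """
--     Two-pass variant: split the qstat -f output into per-job blocks at
--     'Job Id' lines, then turn each block into a dict independently.
--     """
--     # pass 1: cut the lines into blocks; a new block starts at every
--     # line containing 'Job Id'; lines before the first such line form
--     # a leading block.
--     blocks = []
--     cur = []
--     for line in command_out.splitlines():
--         if 'Job Id' in line:
--             blocks.append(cur)
--             cur = [line]
--         else:
--             cur.append(line)
--     blocks.append(cur)
--
--     # pass 2: one dict per block; keep it only if non-empty (the
--     # leading block may produce an empty dict).
--     jobdata = []
--     for block in blocks:
--         job = {}
--         rest = block
--         if block and 'Job Id' in block[0]: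
--             job['Job Id'] = block[0].split()[2].split('.')[0]
--             rest = block[1:]
--         for line in rest:
--             for fld in _fields:
--                 if fld in line:
--                     entry = line.split()
--                     value = entry[1]
--                     if value == '=':
--                         value = entry[2]
--                     job[fld] = value
--         if len(job) > 0:
--             jobdata.append(job)
--     return jobdata
-- ===== Notes on version B (the rewrite author's own statement) =====
-- stated objective: alternative
-- what changed: A's single stateful scan with a running job dict and mid-loop flushes is replaced by two passes: first split the lines into per-job blocks at each 'Job Id' line, then build one dict per block independently (keeping the dict only if non-empty).
import Mathlib
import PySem

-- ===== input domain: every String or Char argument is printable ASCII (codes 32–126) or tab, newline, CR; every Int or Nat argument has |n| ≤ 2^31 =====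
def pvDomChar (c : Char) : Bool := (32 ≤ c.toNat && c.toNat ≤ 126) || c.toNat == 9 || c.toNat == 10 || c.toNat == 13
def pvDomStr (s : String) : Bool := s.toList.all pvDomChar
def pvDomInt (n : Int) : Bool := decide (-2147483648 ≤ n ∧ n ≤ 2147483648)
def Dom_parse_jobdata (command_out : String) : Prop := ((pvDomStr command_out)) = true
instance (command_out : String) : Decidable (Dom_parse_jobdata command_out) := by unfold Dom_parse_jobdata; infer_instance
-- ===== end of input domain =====

-- B re-decomposes A's single stateful scan into block-splitting + per-block dict building (objective: alternative decomposition, same cost).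

-- ===== PORT A =====
-- the module-level _fields tuple, byte for byte (including the merged strings from the missing commas)
def pvFields : List String :=
  ["Job Id", "Job_Name", "Job_Owner", "job_state",
   "queue", "server", "Checkpoint", "ctime",
   "Error_Path", "exec_host", "Hold_TypesJoin_Path",
   "Keep_Files", "Mail_Pointsmtime", "Output_Path", "Priority", "qtime", "Rerunable",
   "Resource_List.cput", "Resource_List.nodect",
   "Resource_List.nodes", "session_id",
   "Variable_List", "etimesubmit_args", "start_time", "start_count"]

-- entry = line.split(); value = entry[1]; if value == '=': value = entry[2]
-- (pyGet? = none is Python's IndexError; those inputs are excluded by Pre_)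
def pvLineValue (line : String) : String :=
  let entry := PySem.Str.split₀ line
  match PySem.List.pyGet? entry 1 with
  | some v => if v = "=" then (PySem.List.pyGet? entry 2).getD "" else v
  | none => ""

-- jobid_str = line.split()[2]; jobid_str.split('.')[0]
def pvJobId (line : String) : String :=
  match PySem.List.pyGet? (PySem.Str.split₀ line) 2 with
  | some s => ((PySem.Str.split? s ".").getD []).headD ""
  | none => ""

-- the inner 'for fld in _fields: if fld in line: … job[fld] = value' loop (identical in A and B)
def pvProcLine (job : PySem.Dict String String) (line : String) : PySem.Dict String String :=
  pvFields.foldl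
    (fun j fld => if PySem.Str.isIn fld line then j.insert fld (pvLineValue line) else j) job

-- A's loop body over the state (jobdata, job)
def pvStepA (s : List (PySem.Dict String String) × PySem.Dict String String) (line : String) :
    List (PySem.Dict String String) × PySem.Dict String String :=
  if PySem.Str.isIn "Job Id" line then
    let s' := if s.2.size ≠ 0 then (s.1 ++ [s.2], PySem.Dict.empty) else s
    (s'.1, s'.2.insert "Job Id" (pvJobId line))
  else
    (s.1, pvProcLine s.2 line)

def parse_jobdata (command_out : String) : List (List (String × String)) :=
  let output := PySem.Str.splitlines command_out
  let r := output.foldl pvStepA ([], PySem.Dict.empty)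
  let jobdata := if r.2.size > 0 then r.1 ++ [r.2] else r.1
  jobdata.map (·.items)

-- ===== PORT B =====
-- pass 1: cut the lines into blocks at every 'Job Id' line (leading lines form an initial block)
def pvStepB (t : List (List String) × List String) (line : String) :
    List (List String) × List String :=
  if PySem.Str.isIn "Job Id" line then (t.1 ++ [t.2], [line]) else (t.1, t.2 ++ [line])

-- pass 2 body: one dict from one block
def pvBlockDict (block : List String) : PySem.Dict String String :=
  match block with
  | [] => PySem.Dict.empty
  | h :: t =>
    if PySem.Str.isIn "Job Id" h then
      t.foldl pvProcLine (PySem.Dict.empty.insert "Job Id" (pvJobId h))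
    else
      (h :: t).foldl pvProcLine PySem.Dict.empty

def parse_jobdata_alt (command_out : String) : List (List (String × String)) :=
  let r := (PySem.Str.splitlines command_out).foldl pvStepB ([], [])
  let blocks := r.1 ++ [r.2]
  blocks.foldl
    (fun acc b =>
      let j := pvBlockDict b
      if j.size > 0 then acc ++ [j.items] else acc) []

-- ===== PRECONDITION & SPEC =====
-- Pre_ excludes exactly the inputs on which the Python A raises IndexError: a 'Job Id'
-- line with fewer than 3 whitespace tokens, or a line matching some field with fewer
-- than 2 tokens (or '=' as second token and fewer than 3).
def Pre_parse_jobdata (command_out : String) : Prop :=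
  ∀ line ∈ PySem.Str.splitlines command_out,
    if PySem.Str.isIn "Job Id" line = true then
      3 ≤ (PySem.Str.split₀ line).length
    else
      (∃ fld ∈ pvFields, PySem.Str.isIn fld line = true) →
        (2 ≤ (PySem.Str.split₀ line).length ∧
          (PySem.List.pyGetD (PySem.Str.split₀ line) 1 "" = "=" →
            3 ≤ (PySem.Str.split₀ line).length))
instance (command_out : String) : Decidable (Pre_parse_jobdata command_out) := by
  unfold Pre_parse_jobdata; infer_instance

def pvWitness_parse_jobdata : String := "Job Id: 12.host\n    Job_Name = run1\n    qtime = 3"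

def Spec_parse_jobdata (command_out : String) (out : List (List (String × String))) : Prop := out = parse_jobdata_alt command_out
instance (command_out : String) (out : List (List (String × String))) : Decidable (Spec_parse_jobdata command_out out) := by unfold Spec_parse_jobdata; infer_instance

-- ===== CLAIM (what is proved, stated in full; the proofs are below) =====
def Claim_equal_parse_jobdata : Prop := ∀ (command_out : String), Dom_parse_jobdata command_out → Pre_parse_jobdata command_out → Spec_parse_jobdata command_out (parse_jobdata command_out)

-- ===== LEMMAS AND PROOFS =====

-- the value a flushed job contributes to the result
def pvFlush (j : PySem.Dict String String) : List (List (String × String)) :=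
  if j.size > 0 then [j.items] else []

-- B's second pass as a function of the block list
def pvProcBlocks (bs : List (List String)) : List (List (String × String)) :=
  bs.flatMap (fun b => pvFlush (pvBlockDict b))

-- B's second-pass foldl computes pvProcBlocks
theorem pvFoldB (bs : List (List String)) (acc : List (List (String × String))) :
    bs.foldl
      (fun acc b =>
        if (pvBlockDict b).size > 0 then acc ++ [(pvBlockDict b).items] else acc) acc
    = acc ++ pvProcBlocks bs := by
  induction bs generalizing acc with
  | nil => simp [pvProcBlocks]
  | cons b bs ih =>
    rw [List.foldl_cons, ih]
    rw [show pvProcBlocks (b :: bs) = pvFlush (pvBlockDict b) ++ pvProcBlocks bs from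
      List.flatMap_cons ..]
    unfold pvFlush
    split <;> simp

theorem pvProcBlocks_append (as bs : List (List String)) :
    pvProcBlocks (as ++ bs) = pvProcBlocks as ++ pvProcBlocks bs :=
  List.flatMap_append ..

theorem pvStepB_acc (lines : List String) (blocks : List (List String)) (cur : List String) :
    lines.foldl pvStepB (blocks, cur)
    = (blocks ++ (lines.foldl pvStepB ([], cur)).1, (lines.foldl pvStepB ([], cur)).2) := by
  induction lines generalizing blocks cur with
  | nil => simp
  | cons line rest ih =>
    rw [List.foldl_cons, List.foldl_cons]
    by_cases hJ : PySem.Str.isIn "Job Id" line = true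
    · rw [show pvStepB (blocks, cur) line = (blocks ++ [cur], [line]) by
          unfold pvStepB; rw [if_pos hJ],
        show pvStepB ([], cur) line = ([cur], [line]) by
          unfold pvStepB; rw [if_pos hJ]; rfl]
      rw [ih (blocks ++ [cur]) [line], ih [cur] [line]]
      simp
    · rw [show pvStepB (blocks, cur) line = (blocks, cur ++ [line]) by
          unfold pvStepB; rw [if_neg hJ],
        show pvStepB ([], cur) line = ([], cur ++ [line]) by
          unfold pvStepB; rw [if_neg hJ]]
      exact ih blocks (cur ++ [line])

theorem pvBlockDict_nil : pvBlockDict [] = PySem.Dict.empty := rfl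

theorem pvBlockDict_cons (hd : String) (tl : List String) :
    pvBlockDict (hd :: tl) =
      if PySem.Str.isIn "Job Id" hd then
        tl.foldl pvProcLine (PySem.Dict.empty.insert "Job Id" (pvJobId hd))
      else (hd :: tl).foldl pvProcLine PySem.Dict.empty := rfl

theorem pvBlockDict_snoc (cur : List String) (line : String)
    (h : ¬ PySem.Str.isIn "Job Id" line = true) :
    pvBlockDict (cur ++ [line]) = pvProcLine (pvBlockDict cur) line := by
  cases cur with
  | nil =>
    show pvBlockDict [line] = pvProcLine (pvBlockDict []) line
    rw [pvBlockDict_cons, if_neg h, pvBlockDict_nil]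
    rw [List.foldl_cons, List.foldl_nil]
  | cons x t =>
    show pvBlockDict (x :: (t ++ [line])) = _
    rw [pvBlockDict_cons, pvBlockDict_cons]
    split
    · rw [List.foldl_append, List.foldl_cons, List.foldl_nil]
    · rw [show x :: (t ++ [line]) = (x :: t) ++ [line] from rfl,
        List.foldl_append, List.foldl_cons, List.foldl_nil]

-- a dict of size 0 is the empty dict
theorem pvDict_size_zero (d : PySem.Dict String String) (h : d.size = 0) :
    d = PySem.Dict.empty := by
  apply PySem.Dict.ext
  have h' : d.items.length = 0 := h
  simp [List.length_eq_zero_iff.mp h', PySem.Dict.empty]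

-- main invariant: A's running (jobdata, job) corresponds to B's (blocks, cur)
theorem pvMain (lines : List String) (jobdata : List (PySem.Dict String String))
    (cur : List String) (job : PySem.Dict String String) (hcur : pvBlockDict cur = job) :
    (lines.foldl pvStepA (jobdata, job)).1.map (·.items)
      ++ pvFlush (lines.foldl pvStepA (jobdata, job)).2
    = jobdata.map (·.items)
      ++ pvProcBlocks ((lines.foldl pvStepB ([], cur)).1
          ++ [(lines.foldl pvStepB ([], cur)).2]) := by
  induction lines generalizing jobdata cur job with
  | nil =>
    rw [List.foldl_nil, List.foldl_nil]
    rw [show pvProcBlocks ([] ++ [cur]) = pvFlush job by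
      rw [List.nil_append]
      show pvFlush (pvBlockDict cur) ++ [] = pvFlush job
      rw [hcur, List.append_nil]]
  | cons line rest ih =>
    rw [List.foldl_cons, List.foldl_cons]
    have hPB : pvProcBlocks [cur] = pvFlush job := by
      show pvFlush (pvBlockDict cur) ++ [] = pvFlush job
      rw [hcur, List.append_nil]
    by_cases hJ : PySem.Str.isIn "Job Id" line = true
    · rw [show pvStepB ([], cur) line = ([cur], [line]) by
        unfold pvStepB; rw [if_pos hJ]; rfl]
      rw [pvStepB_acc rest [cur] [line]]
      rw [List.append_assoc, pvProcBlocks_append, hPB]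
      have hnew : pvBlockDict [line] = PySem.Dict.empty.insert "Job Id" (pvJobId line) := by
        rw [pvBlockDict_cons, if_pos hJ, List.foldl_nil]
      by_cases hz : job.size ≠ 0
      · rw [show pvStepA (jobdata, job) line
            = (jobdata ++ [job], PySem.Dict.empty.insert "Job Id" (pvJobId line)) by
          unfold pvStepA; rw [if_pos hJ, if_pos hz]]
        rw [ih (jobdata ++ [job]) [line] _ hnew]
        rw [show pvFlush job = [job.items] by
          unfold pvFlush; rw [if_pos (Nat.pos_of_ne_zero hz)]]
        simp
      · have hje : job = PySem.Dict.empty := pvDict_size_zero job (by omega)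
        subst hje
        rw [show pvStepA (jobdata, PySem.Dict.empty) line
            = (jobdata, PySem.Dict.empty.insert "Job Id" (pvJobId line)) by
          unfold pvStepA; rw [if_pos hJ, if_neg hz]]
        rw [ih jobdata [line] _ hnew]
        rw [show pvFlush PySem.Dict.empty = [] from rfl]
        simp
    · rw [show pvStepA (jobdata, job) line = (jobdata, pvProcLine job line) by
        unfold pvStepA; rw [if_neg hJ]]
      rw [show pvStepB ([], cur) line = ([], cur ++ [line]) by
        unfold pvStepB; rw [if_neg hJ]]
      exact ih jobdata (cur ++ [line]) _ (by rw [pvBlockDict_snoc cur line hJ, hcur])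

-- A's final flush, pushed through the .items map
theorem pvMapIf (l : List (PySem.Dict String String)) (d : PySem.Dict String String) :
    (if d.size > 0 then l ++ [d] else l).map (·.items)
    = l.map (·.items) ++ pvFlush d := by
  unfold pvFlush
  split <;> simp

-- ===== VERDICT (by name: the statement is the Claim_ definition above) =====
theorem parse_jobdata_spec : Claim_equal_parse_jobdata := by
  intro command_out _ _
  unfold Spec_parse_jobdata parse_jobdata parse_jobdata_alt
  rw [pvFoldB, pvMapIf, List.nil_append]
  exact pvMain (PySem.Str.splitlines command_out) [] [] PySem.Dict.empty rfl
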